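-- pv_equiv track=rewrite | github.com/codemario318/Algorithm | boj/6_DP/11066_파일합치기.py | dp
-- ===== SOURCE A (Python) =====
-- def dp(sums, n):
--     dp = [[], [0]*n, [sums[i+2] - sums[i] for i in range(n-1)]]
--     knuth = [1]*(n-1)
--
--     for d in range(3, n+1):
--         dp_temp, knuth_temp = [], []
--         for i in range(n-d+1):
--             min_sum, opt_k = min(((dp[k][i]+dp[d-k][i+k],k) for k in range(knuth[i], knuth[i+1]+2)),key=lambda x:x[0])
--             dp_temp.append(min_sum + sums[i+d]-sums[i])
--             knuth_temp.append(opt_k)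
--         dp.append(dp_temp)
--         knuth = knuth_temp
--
--     return dp[n][0]
-- ===== SOURCE B (Python) =====
-- def dp(sums, n):
--     # plain O(n^3) interval DP: cost[(i, j)] = min cost to merge files i..j
--     cost = {}
--     for j in range(n):
--         cost[(j, j)] = 0
--         for i in range(j - 1, -1, -1):
--             best = min(cost[(i, k)] + cost[(k + 1, j)] for k in range(i, j))
--             cost[(i, j)] = best + sums[j + 1] - sums[i]
--     return cost[(0, n - 1)]
-- ===== Notes on version B (the rewrite author's own statement) =====
-- stated objective: simpler
-- what changed: B replaces A's Knuth-optimized interval DP (length-layered rows plus a rolling array of optimal split points that narrows every inner scan) with the textbook interval DP: one (i,j)-keyed cost table and a full scan over every split point k in [i,j), no opt arrays.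
-- outside the precondition, e.g. on dp([0, 5, -4, 5, 3], 4): A returns 4, B returns 1
import Mathlib
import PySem

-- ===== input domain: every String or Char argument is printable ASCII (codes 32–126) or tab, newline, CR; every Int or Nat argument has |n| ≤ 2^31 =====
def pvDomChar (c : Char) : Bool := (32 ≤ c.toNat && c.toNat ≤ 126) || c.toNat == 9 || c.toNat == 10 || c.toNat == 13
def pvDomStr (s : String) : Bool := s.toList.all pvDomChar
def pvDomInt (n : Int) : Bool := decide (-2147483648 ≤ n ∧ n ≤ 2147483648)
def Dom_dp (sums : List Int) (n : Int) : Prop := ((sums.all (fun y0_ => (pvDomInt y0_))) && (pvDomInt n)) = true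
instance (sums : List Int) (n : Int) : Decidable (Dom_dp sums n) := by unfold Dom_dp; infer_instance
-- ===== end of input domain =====

-- B replaces A's Knuth-narrowed interval DP (length-layered rows + rolling opt array)
-- with the textbook interval DP over one (i,j)-keyed table and a full split scan;
-- objective: simpler (B is not faster).

-- ===== PORT A =====
-- one iteration of A's 'for d in range(3, n+1)' loop (st = (dp, knuth))
def dpAstep (sums : List Int) (n : Int) (st : List (List Int) × List Int) (d : Int) :
    List (List Int) × List Int :=
  let inner := (PySem.List.pyRange 0 (n - d + 1) 1).foldl
    (fun (acc : List Int × List Int) i =>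
      let m := (PySem.List.min?
        ((PySem.List.pyRange (PySem.List.pyGetD st.2 i 0)
            (PySem.List.pyGetD st.2 (i + 1) 0 + 2) 1).map
          (fun k => (PySem.List.pyGetD (PySem.List.pyGetD st.1 k []) i 0 +
                     PySem.List.pyGetD (PySem.List.pyGetD st.1 (d - k) []) (i + k) 0, k)))
        (fun x => x.1)).getD (0, 0)
      (acc.1 ++ [m.1 + PySem.List.pyGetD sums (i + d) 0 - PySem.List.pyGetD sums i 0],
       acc.2 ++ [m.2]))
    (([] : List Int), ([] : List Int))
  (st.1 ++ [inner.1], inner.2)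

def dp (sums : List Int) (n : Int) : Int :=
  let dp0 : List (List Int) :=
    [[], List.replicate n.toNat (0 : Int),
     (PySem.List.pyRange 0 (n - 1) 1).map
       (fun i => PySem.List.pyGetD sums (i + 2) 0 - PySem.List.pyGetD sums i 0)]
  let knuth0 : List Int := List.replicate (n - 1).toNat (1 : Int)
  let st := (PySem.List.pyRange 3 (n + 1) 1).foldl (dpAstep sums n) (dp0, knuth0)
  PySem.List.pyGetD (PySem.List.pyGetD st.1 n []) 0 0

-- ===== PORT B =====
-- body of B's 'for j in range(n)' loop: insert cost[(j,j)] = 0, then fill column j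
-- from i = j-1 down to 0 with a full scan over the split points k in [i, j)
def dpBstep (sums : List Int) (t : PySem.Dict (Int × Int) Int) (j : Int) :
    PySem.Dict (Int × Int) Int :=
  let t := t.insert (j, j) 0
  (PySem.List.pyRange (j - 1) (-1) (-1)).foldl
    (fun (t : PySem.Dict (Int × Int) Int) i =>
      let best := (PySem.List.min?
        ((PySem.List.pyRange i j 1).map
          (fun k => t.getD (i, k) 0 + t.getD (k + 1, j) 0)) (fun x => x)).getD 0
      t.insert (i, j) (best + PySem.List.pyGetD sums (j + 1) 0 - PySem.List.pyGetD sums i 0))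
    t

def dp_alt (sums : List Int) (n : Int) : Int :=
  let cost := (PySem.List.pyRange 0 n 1).foldl (dpBstep sums) PySem.Dict.empty
  cost.getD (0, n - 1) 0

-- ===== PRECONDITION & SPEC =====
-- Pre_ excludes the inputs where A raises IndexError (n ≤ 0, or n ≥ 2 with fewer than
-- n+1 prefix sums) and, for n ≥ 4, the arrays whose first n+1 entries are not
-- nondecreasing: such arrays are not prefix sums of file sizes, and on them the
-- narrowed split scan and the full split scan defensibly select different minima.
def Pre_dp (sums : List Int) (n : Int) : Prop :=
  1 ≤ n ∧ (n = 1 ∨ n + 1 ≤ (sums.length : Int)) ∧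
    (4 ≤ n → List.Pairwise (· ≤ ·) (sums.take (n + 1).toNat))
instance (sums : List Int) (n : Int) : Decidable (Pre_dp sums n) := by
  unfold Pre_dp; infer_instance
def pvWitness_dp : List Int × Int := ([0, 3, 5, 9, 14], 4)

def Spec_dp (sums : List Int) (n : Int) (out : Int) : Prop := out = dp_alt sums n
instance (sums : List Int) (n : Int) (out : Int) : Decidable (Spec_dp sums n out) := by
  unfold Spec_dp; infer_instance

-- ===== CLAIM (what is proved, stated in full; the proofs are below) =====
def Claim_equal_dp : Prop := ∀ (sums : List Int) (n : Int), Dom_dp sums n → Pre_dp sums n → Spec_dp sums n (dp sums n)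

-- ===== LEMMAS AND PROOFS =====

def minScan (g : Int → Int) (lo hi : Int) : Int × Int :=
  (PySem.List.min? ((PySem.List.pyRange lo hi 1).map (fun k => (g k, k)))
    (fun x => x.1)).getD (0, 0)

theorem min?_some_of_ne_nil {α κ : Type} [LT κ] [DecidableLT κ] (xs : List α) (key : α → κ)
    (h : xs ≠ []) : ∃ m, PySem.List.min? xs key = some m := by
  cases hm : PySem.List.min? xs key with
  | none => exact absurd ((PySem.List.min?_eq_none_iff _ _).mp hm) h
  | some m => exact ⟨m, rfl⟩

theorem minScan_spec (g : Int → Int) (lo hi : Int) (h : lo < hi) :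
    ∃ m : Int, lo ≤ m ∧ m < hi ∧ minScan g lo hi = (g m, m) ∧
      (∀ k, lo ≤ k → k < hi → g m ≤ g k) ∧ (∀ k, lo ≤ k → k < m → g m < g k) := by
  have h' : lo + 1 ≤ hi := h
  induction hi, h' using Int.le_induction with
  | base =>
    refine ⟨lo, le_rfl, by omega, ?_, ?_, ?_⟩
    · unfold minScan
      rw [PySem.List.pyRange_one_singleton]
      rfl
    · intro k hk1 hk2
      have : k = lo := by omega
      subst this; exact le_rfl
    · intro k hk1 hk2; omega
  | succ hi hle ih =>
    obtain ⟨m, hm1, hm2, heq, hmin, hfirst⟩ := ih (by omega)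
    have hne : (PySem.List.pyRange lo hi 1).map (fun k => ((g k, k) : Int × Int)) ≠ [] := by
      simp [PySem.List.pyRange_one]
      omega
    obtain ⟨p, hp⟩ := min?_some_of_ne_nil _ (fun x : Int × Int => x.1) hne
    have hpm : p = (g m, m) := by
      have := heq
      unfold minScan at this
      rw [hp] at this
      simpa using this
    subst hpm
    have hsplit : PySem.List.pyRange lo (hi + 1) 1 = PySem.List.pyRange lo hi 1 ++ [hi] :=
      PySem.List.pyRange_one_succ_right (by omega)
    have hnew : PySem.List.min?
        ((PySem.List.pyRange lo (hi + 1) 1).map (fun k => ((g k, k) : Int × Int)))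
        (fun x => x.1)
        = if g hi < g m then some (g hi, hi) else some (g m, m) := by
      rw [hsplit, List.map_append]
      unfold PySem.List.min? at hp ⊢
      rw [List.foldl_append, hp]
      simp
    by_cases hlt : g hi < g m
    · refine ⟨hi, by omega, by omega, ?_, ?_, ?_⟩
      · unfold minScan
        rw [hnew, if_pos hlt]
        rfl
      · intro k hk1 hk2
        by_cases hkh : k < hi
        · exact le_of_lt (lt_of_lt_of_le hlt (hmin k hk1 hkh))
        · have : k = hi := by omega
          subst this; exact le_rfl
      · intro k hk1 hk2
        exact lt_of_lt_of_le hlt (hmin k hk1 hk2)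
    · refine ⟨m, hm1, by omega, ?_, ?_, hfirst⟩
      · unfold minScan
        rw [hnew, if_neg hlt]
        rfl
      · intro k hk1 hk2
        by_cases hkh : k < hi
        · exact hmin k hk1 hkh
        · have : k = hi := by omega
          subst this; omega

theorem minScan_eq_of (g : Int → Int) (lo hi m : Int) (h1 : lo ≤ m) (h2 : m < hi)
    (hmin : ∀ k, lo ≤ k → k < hi → g m ≤ g k)
    (hfirst : ∀ k, lo ≤ k → k < m → g m < g k) :
    minScan g lo hi = (g m, m) := by
  obtain ⟨m', hm1, hm2, heq, hmin', hfirst'⟩ := minScan_spec g lo hi (by omega)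
  have e1 : g m' ≤ g m := hmin' m h1 h2
  have e2 : g m ≤ g m' := hmin m' hm1 hm2
  have : m' = m := by
    rcases lt_trichotomy m' m with hc | hc | hc
    · have := hfirst m' hm1 hc; omega
    · exact hc
    · have := hfirst' m h1 hc; omega
  rw [heq, this]

theorem minI_eq (g : Int → Int) (lo hi m : Int) (h1 : lo ≤ m) (h2 : m < hi)
    (hmin : ∀ k, lo ≤ k → k < hi → g m ≤ g k) :
    (PySem.List.min? ((PySem.List.pyRange lo hi 1).map g) (fun x => x)).getD 0 = g m := by
  have hne : (PySem.List.pyRange lo hi 1).map g ≠ [] := by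
    simp [PySem.List.pyRange_one]
    omega
  obtain ⟨v, hv⟩ := min?_some_of_ne_nil _ (fun x : Int => x) hne
  have hvm : v ∈ (PySem.List.pyRange lo hi 1).map g := PySem.List.min?_mem hv
  rw [List.mem_map] at hvm
  obtain ⟨k0, hk0, hke⟩ := hvm
  rw [PySem.List.mem_pyRange_one] at hk0
  have e1 : g m ≤ v := by rw [← hke]; exact hmin k0 hk0.1 hk0.2
  have e2 : v ≤ g m := by
    apply PySem.List.min?_isMin hv
    exact List.mem_map_of_mem (by rw [PySem.List.mem_pyRange_one]; omega)
  rw [hv]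
  show v = g m
  omega

def Ff (sums : List Int) : Nat → Int → Int → Int × Int
  | 0, i, _ => (0, i)
  | f + 1, i, j =>
    if j ≤ i then (0, i)
    else
      let m := minScan (fun k => (Ff sums f i k).1 + (Ff sums f (k + 1) j).1) i j
      (m.1 + (PySem.List.pyGetD sums (j + 1) 0 - PySem.List.pyGetD sums i 0), m.2)

def Cv (sums : List Int) (F : Nat) (i j : Int) : Int := (Ff sums F i j).1
def Kv (sums : List Int) (F : Nat) (i j : Int) : Int := (Ff sums F i j).2

def wS (sums : List Int) (i j : Int) : Int :=
  PySem.List.pyGetD sums (j + 1) 0 - PySem.List.pyGetD sums i 0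

theorem Ff_base (sums : List Int) (f : Nat) (i j : Int) (h : j ≤ i) :
    Ff sums f i j = (0, i) := by
  cases f with
  | zero => rfl
  | succ f => simp [Ff, h]


theorem Ff_unfold (sums : List Int) (f : Nat) (i j : Int) (h : i < j) :
    Ff sums (f + 1) i j =
      ((minScan (fun k => (Ff sums f i k).1 + (Ff sums f (k + 1) j).1) i j).1 +
        (PySem.List.pyGetD sums (j + 1) 0 - PySem.List.pyGetD sums i 0),
       (minScan (fun k => (Ff sums f i k).1 + (Ff sums f (k + 1) j).1) i j).2) := by
  conv_lhs => rw [Ff]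
  rw [if_neg (by omega)]

theorem minScan_congr (g g' : Int → Int) (lo hi : Int)
    (h : ∀ k, lo ≤ k → k < hi → g k = g' k) : minScan g lo hi = minScan g' lo hi := by
  unfold minScan
  have : (PySem.List.pyRange lo hi 1).map (fun k => ((g k, k) : Int × Int))
      = (PySem.List.pyRange lo hi 1).map (fun k => (g' k, k)) := by
    apply List.map_congr_left
    intro k hk
    rw [PySem.List.mem_pyRange_one] at hk
    rw [h k hk.1 hk.2]
  rw [this]

theorem Ff_succ_eq (sums : List Int) :
    ∀ (f : Nat) (i j : Int), j - i ≤ (f : Int) → Ff sums (f + 1) i j = Ff sums f i j := by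
  intro f
  induction f with
  | zero =>
    intro i j hle
    have : j ≤ i := by simpa using hle
    rw [Ff_base _ _ _ _ this, Ff_base _ _ _ _ this]
  | succ f ih =>
    intro i j hle
    by_cases hji : j ≤ i
    · rw [Ff_base _ _ _ _ hji, Ff_base _ _ _ _ hji]
    · rw [Ff_unfold sums (f + 1) i j (by omega), Ff_unfold sums f i j (by omega)]
      have hms : minScan (fun k => (Ff sums (f + 1) i k).1 + (Ff sums (f + 1) (k + 1) j).1) i j
          = minScan (fun k => (Ff sums f i k).1 + (Ff sums f (k + 1) j).1) i j := by
        apply minScan_congr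
        intro k hk1 hk2
        rw [ih i k (by omega), ih (k + 1) j (by omega)]
      rw [hms]

theorem Ff_stab (sums : List Int) (f g : Nat) (i j : Int)
    (hf : j - i ≤ (f : Int)) (hg : j - i ≤ (g : Int)) :
    Ff sums f i j = Ff sums g i j := by
  have key : ∀ (d b : Nat), j - i ≤ (b : Int) → Ff sums (b + d) i j = Ff sums b i j := by
    intro d
    induction d with
    | zero => intro b _; rfl
    | succ d ih =>
      intro b hb
      have : b + (d + 1) = (b + d) + 1 := by omega
      rw [this, Ff_succ_eq sums (b + d) i j (by omega), ih b hb]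
  rcases Nat.le_total f g with h | h
  · obtain ⟨d, rfl⟩ := Nat.le.dest h
    exact (key d f hf).symm
  · obtain ⟨d, rfl⟩ := Nat.le.dest h
    exact key d g hg

theorem Ff_spec (sums : List Int) (F : Nat) (i j : Int) (hij : i < j)
    (hf : j - i ≤ (F : Int)) :
    i ≤ Kv sums F i j ∧ Kv sums F i j < j ∧
    Cv sums F i j = Cv sums F i (Kv sums F i j) + Cv sums F (Kv sums F i j + 1) j + wS sums i j ∧
    (∀ k, i ≤ k → k < j →
      Cv sums F i (Kv sums F i j) + Cv sums F (Kv sums F i j + 1) j ≤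
        Cv sums F i k + Cv sums F (k + 1) j) ∧
    (∀ k, i ≤ k → k < Kv sums F i j →
      Cv sums F i (Kv sums F i j) + Cv sums F (Kv sums F i j + 1) j <
        Cv sums F i k + Cv sums F (k + 1) j) := by
  obtain ⟨F', rfl⟩ : ∃ F', F = F' + 1 := ⟨F - 1, by omega⟩
  have hji : ¬ j ≤ i := by omega
  have hunf : Ff sums (F' + 1) i j =
      ((minScan (fun k => (Ff sums F' i k).1 + (Ff sums F' (k + 1) j).1) i j).1 +
        (PySem.List.pyGetD sums (j + 1) 0 - PySem.List.pyGetD sums i 0),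
       (minScan (fun k => (Ff sums F' i k).1 + (Ff sums F' (k + 1) j).1) i j).2) :=
    Ff_unfold sums F' i j hij
  have hms : minScan (fun k => (Ff sums F' i k).1 + (Ff sums F' (k + 1) j).1) i j
      = minScan (fun k => Cv sums (F' + 1) i k + Cv sums (F' + 1) (k + 1) j) i j := by
    apply minScan_congr
    intro k hk1 hk2
    unfold Cv
    rw [Ff_stab sums F' (F' + 1) i k (by omega) (by omega),
        Ff_stab sums F' (F' + 1) (k + 1) j (by omega) (by omega)]
  rw [hms] at hunf
  obtain ⟨m, hm1, hm2, heq, hmin, hfirst⟩ :=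
    minScan_spec (fun k => Cv sums (F' + 1) i k + Cv sums (F' + 1) (k + 1) j) i j hij
  rw [heq] at hunf
  have hK : Kv sums (F' + 1) i j = m := by rw [Kv, hunf]
  have hC : Cv sums (F' + 1) i j =
      Cv sums (F' + 1) i m + Cv sums (F' + 1) (m + 1) j + wS sums i j := by
    rw [Cv, hunf, wS]
  rw [hK]
  exact ⟨hm1, hm2, hC, hmin, hfirst⟩

theorem Cv_diag (sums : List Int) (F : Nat) (i : Int) : Cv sums F i i = 0 := by
  simp [Cv, Ff_base sums F i i le_rfl]

theorem Cv_le_split (sums : List Int) (F : Nat) (i k j : Int) (h1 : i ≤ k) (h2 : k < j)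
    (hf : j - i ≤ (F : Int)) :
    Cv sums F i j ≤ Cv sums F i k + Cv sums F (k + 1) j + wS sums i j := by
  obtain ⟨_, _, he, hmin, _⟩ := Ff_spec sums F i j (by omega) hf
  have := hmin k h1 h2
  omega

def SM (sums : List Int) (n : Int) : Prop :=
  ∀ a b : Int, 0 ≤ a → a ≤ b → b ≤ n →
    PySem.List.pyGetD sums a 0 ≤ PySem.List.pyGetD sums b 0

theorem QI (sums : List Int) (n : Int) (F : Nat) (hm : SM sums n) (hF : n ≤ (F : Int)) :
    ∀ (s : Nat) (i i' j j' : Int), 0 ≤ i → i ≤ i' → i' ≤ j → j ≤ j' → j' ≤ n - 1 →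
      j' - i ≤ (s : Int) →
      Cv sums F i j + Cv sums F i' j' ≤ Cv sums F i j' + Cv sums F i' j := by
  intro s
  induction s with
  | zero =>
    intro i i' j j' h0 hii' hi'j hjj' hjn hs
    have : i = i' ∧ j = j' ∧ i' = j := by omega
    obtain ⟨rfl, rfl, rfl⟩ := this
    omega
  | succ s ih =>
    intro i i' j j' h0 hii' hi'j hjj' hjn hs
    by_cases hii : i = i'
    · subst hii; omega
    by_cases hjj : j = j'
    · subst hjj; omega
    have hii2 : i < i' := by omega
    have hjj2 : j < j' := by omega
    by_cases hij : i' = j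
    · -- case A: i < i' = j < j'
      subst hij
      obtain ⟨hk1, hk2, h4, _, _⟩ := Ff_spec sums F i j' (by omega) (by omega)
      set k := Kv sums F i j' with hkdef
      by_cases hkj : k < i'
      · have h1 := Cv_le_split sums F i k i' hk1 hkj (by omega)
        have h2 := ih (k + 1) i' i' j' (by omega) (by omega) (by omega) (by omega)
          (by omega) (by omega)
        have h3 : wS sums i i' ≤ wS sums i j' := by
          unfold wS
          have := hm (i' + 1) (j' + 1) (by omega) (by omega) (by omega)
          omega
        have hd := Cv_diag sums F i'
        linarith
      · have h1 := Cv_le_split sums F i' k j' (by omega) hk2 (by omega)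
        have h2 := ih i i' i' k (by omega) (by omega) (by omega) (by omega)
          (by omega) (by omega)
        have h3 : wS sums i' j' ≤ wS sums i j' := by
          unfold wS
          have := hm i i' (by omega) (by omega) (by omega)
          omega
        have hd := Cv_diag sums F i'
        linarith
    · -- case B: i < i' < j < j'
      have hij2 : i' < j := by omega
      obtain ⟨hk1, hk2, h5, _, _⟩ := Ff_spec sums F i j' (by omega) (by omega)
      obtain ⟨hk1', hk2', h6, _, _⟩ := Ff_spec sums F i' j (by omega) (by omega)
      set k := Kv sums F i j' with hkdef
      set k' := Kv sums F i' j with hkdef'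
      have h4 : wS sums i j + wS sums i' j' = wS sums i j' + wS sums i' j := by
        unfold wS; ring
      by_cases hkk : k ≤ k'
      · have h1 := Cv_le_split sums F i k j hk1 (by omega) (by omega)
        have h2 := Cv_le_split sums F i' k' j' hk1' (by omega) (by omega)
        have h3 := ih (k + 1) (k' + 1) j j' (by omega) (by omega) (by omega) (by omega)
          (by omega) (by omega)
        linarith
      · have h1 := Cv_le_split sums F i k' j (by omega) hk2' (by omega)
        have h2 := Cv_le_split sums F i' k j' (by omega) (by omega) (by omega)
        have h3 := ih i i' k' k h0 (by omega) (by omega) (by omega)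
          (by omega) (by omega)
        linarith

theorem K_mono_left (sums : List Int) (n : Int) (F : Nat) (hm : SM sums n)
    (hF : n ≤ (F : Int)) (i j : Int) (h0 : 0 ≤ i) (h1 : i + 1 < j) (h2 : j ≤ n - 1) :
    Kv sums F i (j - 1) ≤ Kv sums F i j := by
  by_contra hcon
  obtain ⟨ha1, ha2, _, hamin, hafirst⟩ := Ff_spec sums F i (j - 1) (by omega) (by omega)
  obtain ⟨hb1, hb2, _, hbmin, hbfirst⟩ := Ff_spec sums F i j (by omega) (by omega)
  set k' := Kv sums F i (j - 1) with hk'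
  set k := Kv sums F i j with hk
  have hlt : k < k' := by omega
  have hstrict := hafirst k hb1 hlt
  have hqi := QI sums n F hm hF (j - k - 1).toNat (k + 1) (k' + 1) (j - 1) j
    (by omega) (by omega) (by omega) (by omega) (by omega)
    (by rw [Int.toNat_of_nonneg (by omega)]; omega)
  have hminb := hbmin k' ha1 (by omega)
  linarith

theorem K_mono_right (sums : List Int) (n : Int) (F : Nat) (hm : SM sums n)
    (hF : n ≤ (F : Int)) (i j : Int) (h0 : 0 ≤ i) (h1 : i + 1 < j) (h2 : j ≤ n - 1) :
    Kv sums F i j ≤ Kv sums F (i + 1) j := by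
  by_contra hcon
  obtain ⟨ha1, ha2, _, hamin, hafirst⟩ := Ff_spec sums F (i + 1) j (by omega) (by omega)
  obtain ⟨hb1, hb2, _, hbmin, hbfirst⟩ := Ff_spec sums F i j (by omega) (by omega)
  set k' := Kv sums F (i + 1) j with hk'
  set k := Kv sums F i j with hk
  have hlt : k' < k := by omega
  have hstrict := hbfirst k' (by omega) hlt
  have hqi := QI sums n F hm hF (k - i).toNat i (i + 1) k' k
    (by omega) (by omega) (by omega) (by omega) (by omega)
    (by rw [Int.toNat_of_nonneg (by omega)])
  have hmina := hamin k (by omega) (by omega)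
  linarith

def ckMin (c : Int → Int → Int × Int) (i d : Int) : Int × Int :=
  minScan (fun k => (c i k).1 + (c (i + k) (d - k)).1) ((c i (d - 1)).2)
    ((c (i + 1) (d - 1)).2 + 2)

def ckStep (sums : List Int) (c : Int → Int → Int × Int) (i d : Int) : Int × Int :=
  ((ckMin c i d).1 + PySem.List.pyGetD sums (i + d) 0 - PySem.List.pyGetD sums i 0,
   (ckMin c i d).2)

def ckF (sums : List Int) : Nat → Int → Int → Int × Int
  | 0, _, _ => (0, 1)
  | f + 1, i, d =>
    if d ≤ 1 then (0, 1)
    else if d = 2 then (PySem.List.pyGetD sums (i + 2) 0 - PySem.List.pyGetD sums i 0, 1)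
    else ckStep sums (ckF sums f) i d

theorem ck_one (sums : List Int) (f : Nat) (i d : Int) (hd : d ≤ 1) :
    ckF sums f i d = (0, 1) := by
  cases f with
  | zero => rfl
  | succ f => simp [ckF, hd]

theorem ck_two (sums : List Int) (f : Nat) (i : Int) :
    ckF sums (f + 1) i 2 =
      (PySem.List.pyGetD sums (i + 2) 0 - PySem.List.pyGetD sums i 0, 1) := by
  simp [ckF]

theorem ck_succ (sums : List Int) (f : Nat) (i d : Int) (h3 : 3 ≤ d) :
    ckF sums (f + 1) i d = ckStep sums (ckF sums f) i d := by
  have h1 : ¬ d ≤ 1 := by omega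
  have h2 : d ≠ 2 := by omega
  simp [ckF, h1, h2]

theorem ckMin_congr (c c' : Int → Int → Int × Int) (i d : Int)
    (h1 : c i (d - 1) = c' i (d - 1)) (h2 : c (i + 1) (d - 1) = c' (i + 1) (d - 1))
    (hk : ∀ k, (c i (d - 1)).2 ≤ k → k < (c (i + 1) (d - 1)).2 + 2 →
          c i k = c' i k ∧ c (i + k) (d - k) = c' (i + k) (d - k)) :
    ckMin c i d = ckMin c' i d := by
  unfold ckMin
  rw [← h1, ← h2]
  apply minScan_congr
  intro k hk1 hk2
  obtain ⟨hkl, hkr⟩ := hk k hk1 hk2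
  rw [hkl, hkr]

theorem ckStep_congr (sums : List Int) (c c' : Int → Int → Int × Int) (i d : Int)
    (h1 : c i (d - 1) = c' i (d - 1)) (h2 : c (i + 1) (d - 1) = c' (i + 1) (d - 1))
    (hk : ∀ k, (c i (d - 1)).2 ≤ k → k < (c (i + 1) (d - 1)).2 + 2 →
          c i k = c' i k ∧ c (i + k) (d - k) = c' (i + k) (d - k)) :
    ckStep sums c i d = ckStep sums c' i d := by
  unfold ckStep
  rw [ckMin_congr c c' i d h1 h2 hk]

theorem ckMin_mem (c : Int → Int → Int × Int) (i d : Int)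
    (hne : (c i (d - 1)).2 ≤ (c (i + 1) (d - 1)).2 + 1) :
    (c i (d - 1)).2 ≤ (ckMin c i d).2 ∧ (ckMin c i d).2 ≤ (c (i + 1) (d - 1)).2 + 1 := by
  obtain ⟨m, hm1, hm2, heq, _, _⟩ :=
    minScan_spec (fun k => (c i k).1 + (c (i + k) (d - k)).1) ((c i (d - 1)).2)
      ((c (i + 1) (d - 1)).2 + 2) (by omega)
  unfold ckMin
  rw [heq]
  exact ⟨hm1, by omega⟩

theorem ck_main (sums : List Int) :
    ∀ (f : Nat) (i d : Int), 2 ≤ d → d ≤ (f : Int) + 1 →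
      (∀ g : Nat, d ≤ (g : Int) + 1 → ckF sums g i d = ckF sums f i d) ∧
      (d = 2 → (ckF sums f i d).2 = 1) ∧
      (3 ≤ d → (ckF sums f i (d - 1)).2 ≤ (ckF sums f i d).2 ∧
               (ckF sums f i d).2 ≤ (ckF sums f (i + 1) (d - 1)).2 + 1) ∧
      1 ≤ (ckF sums f i d).2 ∧ (ckF sums f i d).2 ≤ d - 1 := by
  intro f
  induction f with
  | zero =>
    intro i d h2 hle
    exfalso
    simp at hle
    omega
  | succ f ih =>
    intro i d h2 hle
    by_cases hd2 : d = 2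
    · subst hd2
      refine ⟨?_, fun _ => by rw [ck_two], fun h3 => by omega, ?_, ?_⟩
      · intro g hg
        obtain ⟨g', rfl⟩ : ∃ g', g = g' + 1 := ⟨g - 1, by omega⟩
        rw [ck_two, ck_two]
      · rw [ck_two]
      · rw [ck_two]; norm_num
    · have h3 : 3 ≤ d := by omega
      by_cases hsm : d ≤ (f : Int) + 1
      · have IH := ih i d h2 hsm
        have hstab : ckF sums (f + 1) i d = ckF sums f i d := IH.1 (f + 1) (by push_cast; omega)
        refine ⟨fun g hg => (IH.1 g hg).trans hstab.symm, fun h => absurd h hd2, ?_, ?_, ?_⟩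
        · intro _
          have IHl := ih i (d - 1) (by omega) (by omega)
          have IHr := ih (i + 1) (d - 1) (by omega) (by omega)
          rw [hstab, IHl.1 (f + 1) (by push_cast; omega), IHr.1 (f + 1) (by push_cast; omega)]
          exact IH.2.2.1 h3
        · rw [hstab]; exact IH.2.2.2.1
        · rw [hstab]; exact IH.2.2.2.2
      · have IHl := ih i (d - 1) (by omega) (by omega)
        have IHr := ih (i + 1) (d - 1) (by omega) (by omega)
        have hlo1 : 1 ≤ (ckF sums f i (d - 1)).2 := IHl.2.2.2.1
        have hhi2 : (ckF sums f (i + 1) (d - 1)).2 ≤ d - 2 := by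
          have := IHr.2.2.2.2; omega
        have hhi1 : 1 ≤ (ckF sums f (i + 1) (d - 1)).2 := IHr.2.2.2.1
        have e : d - 1 - 1 = d - 2 := by ring
        have hlohi : (ckF sums f i (d - 1)).2 ≤ (ckF sums f (i + 1) (d - 1)).2 + 1 := by
          by_cases hd3 : d = 3
          · have l1 := IHl.2.1 (by omega)
            have r1 := IHr.2.1 (by omega)
            omega
          · have hl := (IHl.2.2.1 (by omega)).2
            have hr := (IHr.2.2.1 (by omega)).1
            rw [e] at hl hr
            omega
        have hstep : ckF sums (f + 1) i d = ckStep sums (ckF sums f) i d := ck_succ sums f i d h3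
        have hmem := ckMin_mem (ckF sums f) i d hlohi
        have h2eq : (ckF sums (f + 1) i d).2 = (ckMin (ckF sums f) i d).2 := by rw [hstep]; rfl
        have congrTo : ∀ g' : Nat, d - 1 ≤ (g' : Int) + 1 →
            ckStep sums (ckF sums g') i d = ckStep sums (ckF sums f) i d := by
          intro g' hg'
          have el : ckF sums g' i (d - 1) = ckF sums f i (d - 1) := IHl.1 g' (by omega)
          have er : ckF sums g' (i + 1) (d - 1) = ckF sums f (i + 1) (d - 1) := IHr.1 g' (by omega)
          apply ckStep_congr sums (ckF sums g') (ckF sums f) i d el er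
          intro k hk1 hk2
          rw [el] at hk1
          rw [er] at hk2
          constructor
          · by_cases hk1' : k ≤ 1
            · rw [ck_one _ _ _ _ hk1', ck_one _ _ _ _ hk1']
            · exact (ih i k (by omega) (by omega)).1 g' (by omega)
          · by_cases hdk : d - k ≤ 1
            · rw [ck_one _ _ _ _ hdk, ck_one _ _ _ _ hdk]
            · exact (ih (i + k) (d - k) (by omega) (by omega)).1 g' (by omega)
        refine ⟨?_, fun h => absurd h hd2, ?_, ?_, ?_⟩
        · intro g hg
          obtain ⟨g', rfl⟩ : ∃ g', g = g' + 1 := ⟨g - 1, by omega⟩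
          rw [ck_succ sums g' i d h3, hstep, congrTo g' (by omega)]
        · intro _
          rw [IHl.1 (f + 1) (by push_cast; omega), IHr.1 (f + 1) (by push_cast; omega), h2eq]
          exact hmem
        · rw [h2eq]; omega
        · rw [h2eq]; omega

theorem ck_top (sums : List Int) (F : Nat) (i d : Int) (h3 : 3 ≤ d) (hdF : d ≤ (F : Int)) :
    ckF sums F i d = ckStep sums (ckF sums F) i d := by
  obtain ⟨F', rfl⟩ : ∃ F', F = F' + 1 := ⟨F - 1, by omega⟩
  have hcast : ((F' : Int)) + 1 = ((F' + 1 : Nat) : Int) := by push_cast; ring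
  have hd1 : d - 1 ≤ (F' : Int) + 1 := by push_cast at hdF ⊢; omega
  rw [ck_succ sums F' i d h3]
  have ml := ck_main sums F' i (d - 1) (by omega) hd1
  have mr := ck_main sums F' (i + 1) (d - 1) (by omega) hd1
  apply ckStep_congr sums (ckF sums F') (ckF sums (F' + 1)) i d
    (ml.1 (F' + 1) (by rw [← hcast]; omega)).symm
    (mr.1 (F' + 1) (by rw [← hcast]; omega)).symm
  intro k hk1 hk2
  have hlo1 : 1 ≤ (ckF sums F' i (d - 1)).2 := ml.2.2.2.1
  have hhi2 : (ckF sums F' (i + 1) (d - 1)).2 ≤ d - 2 := by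
    have := mr.2.2.2.2; omega
  have hkb : 1 ≤ k ∧ k ≤ d - 1 := by omega
  constructor
  · by_cases hk' : k ≤ 1
    · rw [ck_one _ _ _ _ hk', ck_one _ _ _ _ hk']
    · exact ((ck_main sums F' i k (by omega) (by push_cast at hdF ⊢; omega)).1 (F' + 1)
        (by rw [← hcast]; push_cast at hdF; omega)).symm
  · by_cases hdk : d - k ≤ 1
    · rw [ck_one _ _ _ _ hdk, ck_one _ _ _ _ hdk]
    · exact ((ck_main sums F' (i + k) (d - k) (by omega) (by push_cast at hdF ⊢; omega)).1 (F' + 1)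
        (by rw [← hcast]; push_cast at hdF; omega)).symm

theorem ck_eq_full (sums : List Int) (n : Int) (F : Nat) (hm : SM sums n)
    (hF : n ≤ (F : Int)) :
    ∀ (t : Nat) (d i : Int), 1 ≤ d → d ≤ (t : Int) → 0 ≤ i → i + d - 1 ≤ n - 1 →
      ckF sums F i d =
        ((Ff sums F i (i + d - 1)).1, (Ff sums F i (i + d - 1)).2 - i + 1) := by
  intro t
  induction t with
  | zero => intro d i h1 ht; exfalso; simp at ht; omega
  | succ t ih =>
    intro d i h1 ht h0 hbound
    by_cases hd1 : d = 1
    · subst hd1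
      rw [ck_one sums F i 1 (by omega)]
      have e : i + 1 - 1 = i := by ring
      rw [e, Ff_base sums F i i le_rfl]
      rw [Prod.ext_iff]
      exact ⟨rfl, by omega⟩
    · by_cases hd2 : d = 2
      · subst hd2
        obtain ⟨F', rfl⟩ : ∃ F', F = F' + 1 := ⟨F - 1, by omega⟩
        rw [ck_two]
        have e : i + 2 - 1 = i + 1 := by ring
        rw [e]
        obtain ⟨hs1, hs2, hs3, _, _⟩ := Ff_spec sums (F' + 1) i (i + 1) (by omega) (by omega)
        have hKi : Kv sums (F' + 1) i (i + 1) = i := by omega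
        rw [hKi] at hs3
        rw [Cv_diag] at hs3
        have e2 : i + 1 + 1 = i + 2 := by ring
        have hd0 : Cv sums (F' + 1) (i + 1) (i + 1) = 0 := Cv_diag sums (F' + 1) (i + 1)
        rw [hd0] at hs3
        unfold wS at hs3
        rw [e2] at hs3
        have hv : (Ff sums (F' + 1) i (i + 1)).1 =
            PySem.List.pyGetD sums (i + 2) 0 - PySem.List.pyGetD sums i 0 := by
          have : Cv sums (F' + 1) i (i + 1) = (Ff sums (F' + 1) i (i + 1)).1 := rfl
          omega
        have hk : (Ff sums (F' + 1) i (i + 1)).2 = i := hKi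
        rw [Prod.ext_iff]
        exact ⟨by rw [hv], by rw [hk]; ring⟩
      · have h3 : 3 ≤ d := by omega
        rw [ck_top sums F i d h3 (by omega)]
        -- IH for the two length-(d-1) subintervals
        have ihl := ih (d - 1) i (by omega) (by omega) h0 (by omega)
        have ihr := ih (d - 1) (i + 1) (by omega) (by omega) (by omega) (by omega)
        have e1 : i + (d - 1) - 1 = i + d - 2 := by ring
        have e2 : i + 1 + (d - 1) - 1 = i + d - 1 := by ring
        rw [e1] at ihl
        rw [e2] at ihr
        -- specs and monotonicity
        obtain ⟨hs1, hs2, hs3, hsmin, hsfirst⟩ :=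
          Ff_spec sums F i (i + d - 1) (by omega) (by omega)
        obtain ⟨hl1, hl2, _, _, _⟩ := Ff_spec sums F i (i + d - 2) (by omega) (by omega)
        obtain ⟨hr1, hr2, _, _, _⟩ := Ff_spec sums F (i + 1) (i + d - 1) (by omega) (by omega)
        have hml := K_mono_left sums n F hm hF i (i + d - 1) h0 (by omega) (by omega)
        have e3 : i + d - 1 - 1 = i + d - 2 := by ring
        rw [e3] at hml
        have hmr := K_mono_right sums n F hm hF i (i + d - 1) h0 (by omega) (by omega)
        -- glen in terms of Cv
        have hglen : ∀ kl : Int, 1 ≤ kl → kl ≤ d - 1 →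
            (ckF sums F i kl).1 + (ckF sums F (i + kl) (d - kl)).1 =
              Cv sums F i (i + kl - 1) + Cv sums F (i + kl) (i + d - 1) := by
          intro kl hk1 hk2
          have g1 := ih kl i hk1 (by omega) h0 (by omega)
          have g2 := ih (d - kl) (i + kl) (by omega) (by omega) (by omega) (by omega)
          have e : i + kl + (d - kl) - 1 = i + d - 1 := by ring
          rw [e] at g2
          rw [g1, g2]
          rfl
        -- the narrowed scan still finds the first global argmin
        unfold ckStep ckMin
        rw [ihl, ihr]
        set K := Kv sums F i (i + d - 1) with hKdef
        have hKlen1 : 1 ≤ K - i + 1 := by omega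
        have hKlen2 : K - i + 1 ≤ d - 1 := by omega
        have hscan : minScan (fun k => (ckF sums F i k).1 + (ckF sums F (i + k) (d - k)).1)
            ((Ff sums F i (i + d - 2)).2 - i + 1)
            ((Ff sums F (i + 1) (i + d - 1)).2 - (i + 1) + 1 + 2) =
            ((ckF sums F i (K - i + 1)).1 + (ckF sums F (i + (K - i + 1)) (d - (K - i + 1))).1,
             K - i + 1) := by
          apply minScan_eq_of
          · show (Ff sums F i (i + d - 2)).2 - i + 1 ≤ K - i + 1
            have : Kv sums F i (i + d - 2) = (Ff sums F i (i + d - 2)).2 := rfl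
            omega
          · show K - i + 1 < (Ff sums F (i + 1) (i + d - 1)).2 - (i + 1) + 1 + 2
            have : Kv sums F (i + 1) (i + d - 1) = (Ff sums F (i + 1) (i + d - 1)).2 := rfl
            omega
          · intro k hk1 hk2
            have hkvl : Kv sums F i (i + d - 2) = (Ff sums F i (i + d - 2)).2 := rfl
            have hkvr : Kv sums F (i + 1) (i + d - 1) = (Ff sums F (i + 1) (i + d - 1)).2 := rfl
            have hb1 : 1 ≤ k := by omega
            have hb2 : k ≤ d - 1 := by omega
            rw [hglen k hb1 hb2, hglen (K - i + 1) hKlen1 hKlen2]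
            have eK1 : i + (K - i + 1) - 1 = K := by ring
            have eK2 : i + (K - i + 1) = K + 1 := by ring
            rw [eK1, eK2]
            have := hsmin (i + k - 1) (by omega) (by omega)
            have e : i + k - 1 + 1 = i + k := by ring
            rw [e] at this
            exact this
          · intro k hk1 hk2
            have hkvl : Kv sums F i (i + d - 2) = (Ff sums F i (i + d - 2)).2 := rfl
            have hb1 : 1 ≤ k := by omega
            have hb2 : k ≤ d - 1 := by omega
            rw [hglen k hb1 hb2, hglen (K - i + 1) hKlen1 hKlen2]
            have eK1 : i + (K - i + 1) - 1 = K := by ring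
            have eK2 : i + (K - i + 1) = K + 1 := by ring
            rw [eK1, eK2]
            have := hsfirst (i + k - 1) (by omega) (by omega)
            have e : i + k - 1 + 1 = i + k := by ring
            rw [e] at this
            exact this
        rw [hscan]
        rw [Prod.ext_iff]
        constructor
        · show (ckF sums F i (K - i + 1)).1 + (ckF sums F (i + (K - i + 1)) (d - (K - i + 1))).1 +
            PySem.List.pyGetD sums (i + d) 0 - PySem.List.pyGetD sums i 0 =
            (Ff sums F i (i + d - 1)).1
          rw [hglen (K - i + 1) hKlen1 hKlen2]
          have eK1 : i + (K - i + 1) - 1 = K := by ring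
          have eK2 : i + (K - i + 1) = K + 1 := by ring
          rw [eK1, eK2]
          unfold wS at hs3
          have e4 : i + d - 1 + 1 = i + d := by ring
          rw [e4] at hs3
          have : Cv sums F i (i + d - 1) = (Ff sums F i (i + d - 1)).1 := rfl
          have hC1 : Cv sums F i K = Cv sums F i K := rfl
          omega
        · rfl

def colsP (sums : List Int) (F : Nat) (m : Int) (t : PySem.Dict (Int × Int) Int) : Prop :=
  ∀ p q : Int, t.get? (p, q) =
    if 0 ≤ p ∧ p ≤ q ∧ q ≤ m then some (Cv sums F p q) else none

theorem dpB_inner (sums : List Int) (n : Int) (F : Nat) (hF : n ≤ (F : Int)) (j : Int)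
    (_h0 : 0 ≤ j) (hj : j ≤ n - 1) :
    ∀ (N : Nat) (a : Int) (t : PySem.Dict (Int × Int) Int),
      (a + 1).toNat = N → -1 ≤ a → a ≤ j - 1 →
      (∀ p q : Int, t.get? (p, q) =
        if (0 ≤ p ∧ p ≤ q ∧ q ≤ j - 1) ∨ (q = j ∧ a < p ∧ p ≤ j)
        then some (Cv sums F p q) else none) →
      colsP sums F j ((PySem.List.pyRange a (-1) (-1)).foldl
        (fun (t : PySem.Dict (Int × Int) Int) i =>
          let best := (PySem.List.min?
            ((PySem.List.pyRange i j 1).map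
              (fun k => t.getD (i, k) 0 + t.getD (k + 1, j) 0)) (fun x => x)).getD 0
          t.insert (i, j)
            (best + PySem.List.pyGetD sums (j + 1) 0 - PySem.List.pyGetD sums i 0))
        t) := by
  intro N
  induction N with
  | zero =>
    intro a t hN ha1 ha2 ht
    have ha : a = -1 := by omega
    subst ha
    rw [PySem.List.pyRange_neg_one_eq_nil (by omega), List.foldl_nil]
    intro p q
    rw [ht p q]
    have hiff : ((0 ≤ p ∧ p ≤ q ∧ q ≤ j - 1) ∨ (q = j ∧ -1 < p ∧ p ≤ j))
        ↔ (0 ≤ p ∧ p ≤ q ∧ q ≤ j) := by omega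
    simp only [hiff]
  | succ N ihN =>
    intro a t hN ha1 ha2 ht
    have ha0 : 0 ≤ a := by omega
    rw [PySem.List.pyRange_neg_one_cons (by omega : (-1 : Int) < a), List.foldl_cons]
    obtain ⟨hs1, hs2, hs3, hsmin, _⟩ := Ff_spec sums F a j (by omega) (by omega)
    have hmap : (PySem.List.pyRange a j 1).map
        (fun k => t.getD (a, k) 0 + t.getD (k + 1, j) 0)
        = (PySem.List.pyRange a j 1).map (fun k => Cv sums F a k + Cv sums F (k + 1) j) := by
      apply List.map_congr_left
      intro k hk
      rw [PySem.List.mem_pyRange_one] at hk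
      have h1 : t.get? (a, k) = some (Cv sums F a k) := by
        rw [ht]
        rw [if_pos (Or.inl ⟨by omega, by omega, by omega⟩)]
      have h2 : t.get? (k + 1, j) = some (Cv sums F (k + 1) j) := by
        rw [ht]
        rw [if_pos (Or.inr ⟨rfl, by omega, by omega⟩)]
      unfold PySem.Dict.getD
      rw [h1, h2]
      rfl
    have hbest : (PySem.List.min? ((PySem.List.pyRange a j 1).map
        (fun k => t.getD (a, k) 0 + t.getD (k + 1, j) 0)) (fun x => x)).getD 0
        = Cv sums F a (Kv sums F a j) + Cv sums F (Kv sums F a j + 1) j := by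
      rw [hmap]
      exact minI_eq _ a j (Kv sums F a j) hs1 hs2 hsmin
    have hval : (PySem.List.min? ((PySem.List.pyRange a j 1).map
        (fun k => t.getD (a, k) 0 + t.getD (k + 1, j) 0)) (fun x => x)).getD 0
        + PySem.List.pyGetD sums (j + 1) 0 - PySem.List.pyGetD sums a 0
        = Cv sums F a j := by
      rw [hbest]
      unfold wS at hs3
      omega
    have hstep : (let best := (PySem.List.min?
            ((PySem.List.pyRange a j 1).map
              (fun k => t.getD (a, k) 0 + t.getD (k + 1, j) 0)) (fun x => x)).getD 0
          t.insert (a, j)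
            (best + PySem.List.pyGetD sums (j + 1) 0 - PySem.List.pyGetD sums a 0))
        = t.insert (a, j) (Cv sums F a j) := by
      show t.insert (a, j) _ = t.insert (a, j) (Cv sums F a j)
      rw [hval]
    rw [hstep]
    apply ihN (a - 1) _ (by omega) (by omega) (by omega)
    intro p q
    rw [PySem.Dict.get?_insert]
    by_cases hp : ((p, q) : Int × Int) = (a, j)
    · rw [Prod.mk.injEq] at hp
      rw [if_pos (by rw [Prod.mk.injEq]; exact hp), if_pos (by omega)]
      obtain ⟨hp1, hp2⟩ := hp
      rw [hp1, hp2]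
    · rw [if_neg hp, ht p q]
      rw [Prod.mk.injEq] at hp
      have hne : p ≠ a ∨ q ≠ j := by
        rcases Decidable.em (p = a) with h1' | h1'
        · exact Or.inr (fun h2' => hp ⟨h1', h2'⟩)
        · exact Or.inl h1'
      have hiff : ((0 ≤ p ∧ p ≤ q ∧ q ≤ j - 1) ∨ (q = j ∧ a < p ∧ p ≤ j))
          ↔ ((0 ≤ p ∧ p ≤ q ∧ q ≤ j - 1) ∨ (q = j ∧ a - 1 < p ∧ p ≤ j)) := by omega
      simp only [hiff]

theorem dpB_cols (sums : List Int) (n : Int) (F : Nat) (hF : n ≤ (F : Int)) :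
    ∀ m : Int, 0 ≤ m → m ≤ n →
      colsP sums F (m - 1)
        ((PySem.List.pyRange 0 m 1).foldl (dpBstep sums) PySem.Dict.empty) := by
  intro m hm
  induction m, hm using Int.le_induction with
  | base =>
    intro _
    rw [PySem.List.pyRange_one_eq_nil (by omega), List.foldl_nil]
    intro p q
    rw [if_neg (by omega)]
    rfl
  | succ m hm ihm =>
    intro hmn
    rw [PySem.List.pyRange_one_succ_right (by omega), List.foldl_append,
      List.foldl_cons, List.foldl_nil]
    have hT := ihm (by omega)
    set T := List.foldl (dpBstep sums) PySem.Dict.empty (PySem.List.pyRange 0 m 1) with hTdef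
    rw [show m + 1 - 1 = m from by ring]
    unfold dpBstep
    apply dpB_inner sums n F hF m (by omega) (by omega) ((m - 1) + 1).toNat (m - 1) _ rfl
      (by omega) (by omega)
    intro p q
    rw [PySem.Dict.get?_insert]
    by_cases hp : ((p, q) : Int × Int) = (m, m)
    · rw [Prod.mk.injEq] at hp
      rw [if_pos (by rw [Prod.mk.injEq]; exact hp), if_pos (by omega)]
      obtain ⟨hp1, hp2⟩ := hp
      rw [hp1, hp2, Cv_diag]
    · rw [if_neg hp, hT p q]
      rw [Prod.mk.injEq] at hp
      have hne : p ≠ m ∨ q ≠ m := by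
        rcases Decidable.em (p = m) with h1' | h1'
        · exact Or.inr (fun h2' => hp ⟨h1', h2'⟩)
        · exact Or.inl h1'
      by_cases hc : 0 ≤ p ∧ p ≤ q ∧ q ≤ m - 1
      · rw [if_pos hc, if_pos (Or.inl hc)]
      · rw [if_neg hc, if_neg (by omega)]

theorem dpB_eq (sums : List Int) (n : Int) (F : Nat) (hF : n ≤ (F : Int)) (h1 : 1 ≤ n) :
    dp_alt sums n = Cv sums F 0 (n - 1) := by
  simp only [dp_alt]
  have hc := dpB_cols sums n F hF n (by omega) le_rfl
  have h := hc 0 (n - 1)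
  rw [if_pos (by omega)] at h
  unfold PySem.Dict.getD
  rw [h]
  rfl

theorem minScan_one (g : Int → Int) (lo : Int) : minScan g lo (lo + 1) = (g lo, lo) := by
  unfold minScan
  rw [PySem.List.pyRange_one_singleton]
  rfl

theorem minScan_two (g : Int → Int) (lo : Int) :
    minScan g lo (lo + 2) =
      if g (lo + 1) < g lo then (g (lo + 1), lo + 1) else (g lo, lo) := by
  unfold minScan
  have hr : PySem.List.pyRange lo (lo + 2) 1 = [lo, lo + 1] := by
    rw [PySem.List.pyRange_one_cons (by omega), show lo + 2 = (lo + 1) + 1 from by ring,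
      PySem.List.pyRange_one_singleton]
  rw [hr]
  show (if g (lo + 1) < g lo then some (g (lo + 1), lo + 1) else some (g lo, lo)).getD (0, 0) = _
  split_ifs <;> rfl

theorem Ff_d1' (sums : List Int) (f : Nat) (i j : Int) (hj : j = i + 1) (hf : 1 ≤ f) :
    Ff sums f i j =
      (PySem.List.pyGetD sums (j + 1) 0 - PySem.List.pyGetD sums i 0, i) := by
  subst hj
  obtain ⟨f', rfl⟩ : ∃ f', f = f' + 1 := ⟨f - 1, by omega⟩
  rw [Ff_unfold sums f' i (i + 1) (by omega), minScan_one]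
  rw [Ff_base sums f' i i le_rfl, Ff_base sums f' (i + 1) (i + 1) le_rfl]
  rw [Prod.ext_iff]
  constructor
  · show (0 : Int) + 0 + _ = _
    omega
  · rfl

theorem eq3 (sums : List Int) (F : Nat) (i : Int) (hf : 3 ≤ (F : Int)) :
    (ckF sums F i 3).1 = (Ff sums F i (i + 2)).1 := by
  obtain ⟨F', rfl⟩ : ∃ F', F = F' + 1 := ⟨F - 1, by omega⟩
  have hf1 : 1 ≤ F' := by omega
  -- A side
  rw [ck_top sums (F' + 1) i 3 (by omega) (by omega)]
  unfold ckStep ckMin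
  rw [show (3 : Int) - 1 = 2 from by norm_num]
  rw [ck_two sums F' i, ck_two sums F' (i + 1)]
  show (minScan (fun k => (ckF sums (F' + 1) i k).1 + (ckF sums (F' + 1) (i + k) (3 - k)).1)
      1 (1 + 2)).1 + PySem.List.pyGetD sums (i + 3) 0 - PySem.List.pyGetD sums i 0 = _
  rw [minScan_two]
  -- B side
  rw [Ff_unfold sums F' i (i + 2) (by omega)]
  show _ = (minScan (fun k => (Ff sums F' i k).1 + (Ff sums F' (k + 1) (i + 2)).1) i (i + 2)).1 +
    (PySem.List.pyGetD sums (i + 2 + 1) 0 - PySem.List.pyGetD sums i 0)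
  rw [minScan_two]
  rw [show (1 : Int) + 1 = 2 from by norm_num, show (3 : Int) - 2 = 1 from by norm_num,
    show (3 : Int) - 1 = 2 from by norm_num]
  rw [ck_two sums F' i, ck_two sums F' (i + 1), ck_one sums (F' + 1) (i + 2) 1 (by norm_num),
    ck_one sums (F' + 1) i 1 (by norm_num)]
  rw [Ff_d1' sums F' i (i + 1) rfl hf1, Ff_d1' sums F' (i + 1) (i + 2) (by ring) hf1,
    Ff_base sums F' (i + 1 + 1) (i + 2) (by omega), Ff_base sums F' i i le_rfl]
  simp only []
  rw [show i + 1 + 1 = i + 2 from by ring, show i + 1 + 2 = i + 3 from by ring,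
    show i + 2 + 1 = i + 3 from by ring]
  split_ifs <;> omega

theorem SM_of_sorted (sums : List Int) (n : Int) (hn : 1 ≤ n)
    (hlen : n + 1 ≤ (sums.length : Int))
    (hp : List.Pairwise (· ≤ ·) (sums.take (n + 1).toNat)) : SM sums n := by
  intro a b h0 hab hbn
  by_cases heq : a = b
  · subst heq; exact le_rfl
  · have hb : b < (sums.length : Int) := by omega
    have ha : a < (sums.length : Int) := by omega
    rw [PySem.List.pyGetD_eq_getElem sums 0 h0 ha,
        PySem.List.pyGetD_eq_getElem sums 0 (by omega) hb]
    have htl : (sums.take (n + 1).toNat).length = (n + 1).toNat := by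
      rw [List.length_take]
      omega
    have hia : a.toNat < (sums.take (n + 1).toNat).length := by omega
    have hib : b.toNat < (sums.take (n + 1).toNat).length := by omega
    have := List.pairwise_iff_getElem.mp hp a.toNat b.toNat hia hib (by omega)
    rw [List.getElem_take, List.getElem_take] at this
    exact this

def rowC (sums : List Int) (F : Nat) (n L : Int) : List Int :=
  if L = 0 then [] else (PySem.List.pyRange 0 (n - L + 1) 1).map (fun i => (ckF sums F i L).1)

def dpRows (sums : List Int) (F : Nat) (n m : Int) : List (List Int) :=
  (PySem.List.pyRange 0 (m + 1) 1).map (rowC sums F n)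

def optRow (sums : List Int) (F : Nat) (n m : Int) : List Int :=
  (PySem.List.pyRange 0 (n - m + 1) 1).map (fun i => (ckF sums F i m).2)

theorem dpA_cell (sums : List Int) (F : Nat) (n d i : Int) (hF : (F : Int) = n)
    (h3 : 3 ≤ d) (hdn : d ≤ n) (hi0 : 0 ≤ i) (hin : i < n - d + 1) :
    (PySem.List.min?
      ((PySem.List.pyRange (PySem.List.pyGetD (optRow sums F n (d - 1)) i 0)
          (PySem.List.pyGetD (optRow sums F n (d - 1)) (i + 1) 0 + 2) 1).map
        (fun k => (PySem.List.pyGetD (PySem.List.pyGetD (dpRows sums F n (d - 1)) k []) i 0 +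
                   PySem.List.pyGetD (PySem.List.pyGetD (dpRows sums F n (d - 1)) (d - k) []) (i + k) 0, k)))
      (fun x => x.1)).getD (0, 0) = ckMin (ckF sums F) i d := by
  have hd1F : d - 1 ≤ (F : Int) + 1 := by omega
  have hlo : PySem.List.pyGetD (optRow sums F n (d - 1)) i 0 = (ckF sums F i (d - 1)).2 := by
    unfold optRow
    exact PySem.List.pyGetD_map_pyRange_of_nonneg _ _ _ _ hi0 (by omega)
  have hhi : PySem.List.pyGetD (optRow sums F n (d - 1)) (i + 1) 0 = (ckF sums F (i + 1) (d - 1)).2 := by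
    unfold optRow
    exact PySem.List.pyGetD_map_pyRange_of_nonneg _ _ _ _ (by omega) (by omega)
  have ml := ck_main sums F i (d - 1) (by omega) hd1F
  have mr := ck_main sums F (i + 1) (d - 1) (by omega) hd1F
  have hlo1 : 1 ≤ (ckF sums F i (d - 1)).2 := ml.2.2.2.1
  have hhi2 : (ckF sums F (i + 1) (d - 1)).2 ≤ d - 2 := by have := mr.2.2.2.2; omega
  rw [hlo, hhi]
  unfold ckMin minScan
  congr 1
  congr 1
  apply List.map_congr_left
  intro k hk
  rw [PySem.List.mem_pyRange_one] at hk
  have hkb : 1 ≤ k ∧ k ≤ d - 1 := by omega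
  have hrow : PySem.List.pyGetD (dpRows sums F n (d - 1)) k [] = rowC sums F n k := by
    unfold dpRows
    exact PySem.List.pyGetD_map_pyRange_of_nonneg _ _ _ _ (by omega) (by omega)
  have hrow2 : PySem.List.pyGetD (dpRows sums F n (d - 1)) (d - k) [] = rowC sums F n (d - k) := by
    unfold dpRows
    exact PySem.List.pyGetD_map_pyRange_of_nonneg _ _ _ _ (by omega) (by omega)
  rw [hrow, hrow2]
  have hv1 : PySem.List.pyGetD (rowC sums F n k) i 0 = (ckF sums F i k).1 := by
    unfold rowC
    rw [if_neg (by omega)]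
    exact PySem.List.pyGetD_map_pyRange_of_nonneg _ _ _ _ hi0 (by omega)
  have hv2 : PySem.List.pyGetD (rowC sums F n (d - k)) (i + k) 0 = (ckF sums F (i + k) (d - k)).1 := by
    unfold rowC
    rw [if_neg (by omega)]
    exact PySem.List.pyGetD_map_pyRange_of_nonneg _ _ _ _ (by omega) (by omega)
  rw [hv1, hv2]

theorem foldl_pair_append (l : List Int) (X Y : Int → Int)
    (f : (List Int × List Int) → Int → (List Int × List Int))
    (hf : ∀ acc i, i ∈ l → f acc i = (acc.1 ++ [X i], acc.2 ++ [Y i])) :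
    l.foldl f ([], []) = (l.map X, l.map Y) := by
  suffices h : ∀ A B, l.foldl f (A, B) = (A ++ l.map X, B ++ l.map Y) by
    simpa using h [] []
  induction l with
  | nil => intro A B; simp
  | cons a t ih =>
    intro A B
    have hstep := hf (A, B) a (List.mem_cons_self)
    simp only [List.foldl_cons, hstep]
    rw [ih (fun acc i hi => hf acc i (List.mem_cons_of_mem a hi)) _ _]
    simp

theorem dpAstep_eq (sums : List Int) (F : Nat) (n d : Int) (hF : (F : Int) = n)
    (h3 : 3 ≤ d) (hdn : d ≤ n) :
    dpAstep sums n (dpRows sums F n (d - 1), optRow sums F n (d - 1)) d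
      = (dpRows sums F n d, optRow sums F n d) := by
  simp only [dpAstep]
  rw [foldl_pair_append _ (fun i => (ckF sums F i d).1) (fun i => (ckF sums F i d).2) _ ?hf]
  case hf =>
    intro acc i hi
    rw [PySem.List.mem_pyRange_one] at hi
    simp only
    rw [dpA_cell sums F n d i hF h3 hdn hi.1 hi.2]
    rw [ck_top sums F i d h3 (by omega)]
    rfl
  · have e1 : d - 1 + 1 = d := by ring
    have hrow : rowC sums F n d
        = (PySem.List.pyRange 0 (n - d + 1) 1).map (fun i => (ckF sums F i d).1) := by
      unfold rowC
      rw [if_neg (by omega)]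
    have hrows : dpRows sums F n d = dpRows sums F n (d - 1) ++ [rowC sums F n d] := by
      unfold dpRows
      rw [PySem.List.pyRange_one_succ_right (a := 0) (b := d) (by omega), List.map_append, e1]
      rfl
    dsimp only
    rw [hrows, hrow]
    rfl

theorem dpA_eq (sums : List Int) (F : Nat) (n : Int) (hF : (F : Int) = n) (h2 : 2 ≤ n) :
    dp sums n = (ckF sums F 0 n).1 := by
  have hTN : n.toNat = F := by omega
  have hrow1 : rowC sums F n 1 = List.replicate F (0 : Int) := by
    unfold rowC
    rw [if_neg (by omega)]
    rw [List.eq_replicate_iff]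
    constructor
    · simp [PySem.List.length_pyRange_one]
      omega
    · intro b hb
      simp only [List.mem_map] at hb
      obtain ⟨i, hi, hbe⟩ := hb
      rw [← hbe, ck_one sums F i 1 (by omega)]
  have hrow2 : rowC sums F n 2 = (PySem.List.pyRange 0 (n - 1) 1).map
      (fun i => PySem.List.pyGetD sums (i + 2) 0 - PySem.List.pyGetD sums i 0) := by
    unfold rowC
    rw [if_neg (by omega)]
    have e : n - 2 + 1 = n - 1 := by ring
    rw [e]
    apply List.map_congr_left
    intro i hi
    obtain ⟨F', hFe⟩ : ∃ F', F = F' + 1 := ⟨F - 1, by omega⟩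
    rw [hFe, ck_two]
  have hopt2 : optRow sums F n 2 = List.replicate (n - 1).toNat (1 : Int) := by
    unfold optRow
    rw [List.eq_replicate_iff]
    constructor
    · simp [PySem.List.length_pyRange_one]
      omega
    · intro b hb
      simp only [List.mem_map] at hb
      obtain ⟨i, hi, hbe⟩ := hb
      obtain ⟨F', hFe⟩ : ∃ F', F = F' + 1 := ⟨F - 1, by omega⟩
      rw [← hbe, hFe, ck_two]
  have hrows2 : dpRows sums F n 2 = [[], List.replicate F (0 : Int),
      (PySem.List.pyRange 0 (n - 1) 1).map
        (fun i => PySem.List.pyGetD sums (i + 2) 0 - PySem.List.pyGetD sums i 0)] := by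
    unfold dpRows
    have h012 : PySem.List.pyRange 0 (2 + 1 : Int) 1 = [0, 1, 2] := by decide
    rw [h012]
    have h0 : rowC sums F n 0 = [] := by unfold rowC; rw [if_pos rfl]
    simp [h0, hrow1, hrow2]
  have main : ∀ m : Int, 2 ≤ m → m ≤ n →
      (PySem.List.pyRange 3 (m + 1) 1).foldl (dpAstep sums n)
        ([[], List.replicate F (0 : Int),
          (PySem.List.pyRange 0 (n - 1) 1).map
            (fun i => PySem.List.pyGetD sums (i + 2) 0 - PySem.List.pyGetD sums i 0)],
         List.replicate (n - 1).toNat (1 : Int))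
      = (dpRows sums F n m, optRow sums F n m) := by
    intro m hm
    induction m, hm using Int.le_induction with
    | base =>
      intro _
      rw [PySem.List.pyRange_one_eq_nil (a := 3) (b := 2 + 1) (by omega)]
      rw [List.foldl_nil, hrows2, hopt2]
    | succ m hm ih =>
      intro hmn
      rw [PySem.List.pyRange_one_succ_right (a := 3) (b := m + 1) (by omega), List.foldl_append,
        ih (by omega), List.foldl_cons, List.foldl_nil]
      have e2 : m + 1 - 1 = m := by ring
      have hstep := dpAstep_eq sums F n (m + 1) hF (by omega) (by omega)
      rw [e2] at hstep
      exact hstep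
  simp only [dp, hTN]
  rw [main n h2 le_rfl]
  dsimp only
  have h1 : PySem.List.pyGetD (dpRows sums F n n) n [] = rowC sums F n n := by
    unfold dpRows
    exact PySem.List.pyGetD_map_pyRange_of_nonneg _ _ _ _ (by omega) (by omega)
  rw [h1]
  unfold rowC
  rw [if_neg (by omega)]
  exact PySem.List.pyGetD_map_pyRange_of_nonneg _ _ _ _ (by omega) (by omega)

theorem dp_eq_dp_alt (sums : List Int) (n : Int)
    (hpre : 1 ≤ n ∧ (n = 1 ∨ n + 1 ≤ (sums.length : Int)) ∧
      (4 ≤ n → List.Pairwise (· ≤ ·) (sums.take (n + 1).toNat))) :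
    dp sums n = dp_alt sums n := by
  obtain ⟨h1, hlen, hmono⟩ := hpre
  by_cases hn1 : n = 1
  · subst hn1
    rw [dpB_eq sums 1 1 (by norm_num) le_rfl]
    rw [show (1 : Int) - 1 = 0 from by norm_num, Cv_diag]
    simp only [dp]
    rw [PySem.List.pyRange_one_eq_nil (a := 3) (b := 1 + 1) (by norm_num), List.foldl_nil,
      PySem.List.pyRange_one_eq_nil (a := 0) (b := 1 - 1) (by norm_num), List.map_nil]
    decide
  · have h2 : 2 ≤ n := by omega
    have hlen2 : n + 1 ≤ (sums.length : Int) := by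
      rcases hlen with h | h
      · omega
      · exact h
    have hF : ((n.toNat : Nat) : Int) = n := Int.toNat_of_nonneg (by omega)
    rw [dpA_eq sums n.toNat n hF h2, dpB_eq sums n n.toNat (by omega) (by omega)]
    by_cases hn2 : n = 2
    · subst hn2
      obtain ⟨F', hFe⟩ : ∃ F', (2 : Int).toNat = F' + 1 := ⟨(2 : Int).toNat - 1, by omega⟩
      rw [hFe, ck_two sums F' 0]
      rw [show (2 : Int) - 1 = 1 from by norm_num]
      unfold Cv
      rw [Ff_d1' sums (F' + 1) 0 1 (by norm_num) (by omega)]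
      show PySem.List.pyGetD sums (0 + 2) 0 - PySem.List.pyGetD sums 0 0 =
        PySem.List.pyGetD sums (1 + 1) 0 - PySem.List.pyGetD sums 0 0
      rw [show (0 : Int) + 2 = 2 from by norm_num, show (1 : Int) + 1 = 2 from by norm_num]
    · rcases (by omega : n = 3 ∨ 4 ≤ n) with h3 | h4
      · subst h3
        rw [show (3 : Int) - 1 = 2 from by norm_num]
        rw [eq3 sums (3 : Int).toNat 0 (by norm_num), show (0 : Int) + 2 = 2 from by norm_num]
        rfl
      · have hsm := SM_of_sorted sums n (by omega) hlen2 (hmono h4)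
        have hfull := ck_eq_full sums n n.toNat hsm (by omega) n.toNat n 0 (by omega)
          (by omega) (by omega) (by omega)
        rw [hfull, show (0 : Int) + n - 1 = n - 1 from by ring]
        rfl

-- ===== VERDICT (by name: the statement is the Claim_ definition above) =====
theorem dp_spec : Claim_equal_dp := by
  unfold Claim_equal_dp
  intro sums n _ hpre
  unfold Spec_dp
  unfold Pre_dp at hpre
  exact dp_eq_dp_alt sums n hpre
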